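-- pv_equiv track=rewrite | github.com/sandeepkale1999/PythonInsta | Problems/one2.py | lastmodified
-- ===== SOURCE A (Python) =====
-- def lastmodified(input1,input2):
--    c = 0
--    for i in reversed(input2):
--        c += 1
--        if i == 9:
--           pass
--        else:
--           return(len(input2)-c+1)
--
--    return 0
-- ===== SOURCE B (Python) =====
-- def lastmodified(input1, input2):
--     result = 0
--     for i, x in enumerate(input2):
--         if x != 9:
--             result = i + 1
--     return result
-- ===== Notes on version B (the rewrite author's own statement) =====
-- stated objective: alternative
-- what changed: Replaces the backward scan with early return (reversed(input2) plus a counter and len arithmetic) by a single forward pass with enumerate that overwrites a last-match position; no reversal, no early exit, no length arithmetic.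
import Mathlib
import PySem

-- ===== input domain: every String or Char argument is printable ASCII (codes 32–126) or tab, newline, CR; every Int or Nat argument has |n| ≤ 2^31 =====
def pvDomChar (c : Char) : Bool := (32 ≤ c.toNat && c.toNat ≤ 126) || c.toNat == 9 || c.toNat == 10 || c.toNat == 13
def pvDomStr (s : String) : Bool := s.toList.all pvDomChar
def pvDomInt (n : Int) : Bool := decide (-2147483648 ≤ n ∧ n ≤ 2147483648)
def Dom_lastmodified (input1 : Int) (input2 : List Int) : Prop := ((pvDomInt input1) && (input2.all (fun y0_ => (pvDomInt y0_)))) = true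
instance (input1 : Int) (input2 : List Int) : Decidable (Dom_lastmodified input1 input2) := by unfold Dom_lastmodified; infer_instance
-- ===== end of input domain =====

-- B replaces A's backward scan with early return by a forward enumerate pass keeping a last-match position (alternative decomposition, same cost).

-- ===== PORT A =====
-- A's loop over reversed(input2) with counter c; early return becomes the non-recursive branch.
def lastmodifiedGoA (n : Int) : List Int → Int → Int
  | [], _ => 0
  | i :: rest, c =>
    let c := c + 1
    if i == 9 then lastmodifiedGoA n rest c else n - c + 1

def lastmodified (input1 : Int) (input2 : List Int) : Int :=
  lastmodifiedGoA (input2.length : Int) input2.reverse 0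

-- ===== PORT B =====
def lastmodified_alt (input1 : Int) (input2 : List Int) : Int :=
  (PySem.List.enumerate input2 0).foldl
    (fun result p => if p.2 ≠ 9 then p.1 + 1 else result) 0

-- ===== PRECONDITION & SPEC =====
def Spec_lastmodified (input1 : Int) (input2 : List Int) (out : Int) : Prop := out = lastmodified_alt input1 input2
instance (input1 : Int) (input2 : List Int) (out : Int) : Decidable (Spec_lastmodified input1 input2 out) := by unfold Spec_lastmodified; infer_instance

-- ===== CLAIM (what is proved, stated in full; the proofs are below) =====
def Claim_equal_lastmodified : Prop := ∀ (input1 : Int) (input2 : List Int), Dom_lastmodified input1 input2 → Spec_lastmodified input1 input2 (lastmodified input1 input2)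

-- ===== LEMMAS AND PROOFS =====

-- shifting the counter by one is the same as shrinking the length by one
theorem goA_shift (xs : List Int) : ∀ (n c : Int),
    lastmodifiedGoA n xs (c + 1) = lastmodifiedGoA (n - 1) xs c := by
  induction xs with
  | nil => intro n c; simp [lastmodifiedGoA]
  | cons i rest ih =>
    intro n c
    simp only [lastmodifiedGoA]
    split
    · exact ih n (c + 1)
    · ring

-- B on a snoc: the last element decides between its own position and the old result
theorem altB_snoc (l : List Int) (x : Int) (r : Int) (s : Int) :
    (PySem.List.enumerate (l ++ [x]) s).foldl
      (fun result p => if p.2 ≠ 9 then p.1 + 1 else result) r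
    = (if x ≠ 9 then s + (l.length : Int) + 1
       else (PySem.List.enumerate l s).foldl
              (fun result p => if p.2 ≠ 9 then p.1 + 1 else result) r) := by
  rw [PySem.List.enumerate_append, List.foldl_append]
  simp [PySem.List.enumerate]

theorem lastmodified_eq (l : List Int) :
    lastmodifiedGoA (l.length : Int) l.reverse 0
    = (PySem.List.enumerate l 0).foldl
        (fun result p => if p.2 ≠ 9 then p.1 + 1 else result) 0 := by
  induction l using List.reverseRecOn with
  | nil => simp [lastmodifiedGoA, PySem.List.enumerate]
  | append_singleton l x ih =>
    rw [List.reverse_append, altB_snoc]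
    simp only [List.reverse_singleton, List.singleton_append, lastmodifiedGoA,
      List.length_append, List.length_singleton]
    by_cases hx : x = 9
    · simp only [hx, beq_self_eq_true, if_true, ne_eq, not_true_eq_false, if_false]
      rw [goA_shift]
      have h0 : ((l.length + 1 : Nat) : Int) - 1 = (l.length : Int) := by push_cast; ring
      rw [h0]
      simpa using ih
    · simp only [ne_eq, hx, not_false_eq_true, if_true, beq_iff_eq]
      push_cast; ring

-- ===== VERDICT (by name: the statement is the Claim_ definition above) =====
theorem lastmodified_spec : Claim_equal_lastmodified := by
  intro input1 input2 _
  show lastmodified input1 input2 = lastmodified_alt input1 input2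
  exact lastmodified_eq input2
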